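-- pv_equiv track=rewrite | github.com/kparkerNRO/fs-organizer | organizer/utils/filename_processing.py | get_max_common_string
-- ===== SOURCE A (Python) =====
-- def get_max_common_string(tokens, name_to_comp):
--     base_token = tokens[0]
--     working_token = [base_token]
--     lower_tokens = [token.lower() for token in tokens]
--     lower_name = name_to_comp.lower()
--
--     # greedily add tokens until they stop matching
--     for i in range(1, len(tokens) + 1):
--         test_token = " ".join(lower_tokens[0:i])
--         if lower_name.startswith(test_token):
--             working_token = lower_tokens[0:i]
--         else:
--             break
--
--     shared_tokens = " ".join(tokens[: len(working_token)])
--     return shared_tokens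
-- ===== SOURCE B (Python) =====
-- def get_max_common_string(tokens, name_to_comp):
--     # Single linear scan: match each token incrementally at a running
--     # position instead of re-joining and re-testing a growing prefix.
--     lower_name = name_to_comp.lower()
--     pos = 0
--     k = 0
--     for i, tok in enumerate(tokens):
--         piece = tok.lower() if i == 0 else " " + tok.lower()
--         if lower_name.startswith(piece, pos):
--             pos += len(piece)
--             k += 1
--         else:
--             break
--     return " ".join(tokens[:max(k, 1)])
-- ===== Notes on version B (the rewrite author's own statement) =====
-- stated objective: faster
-- what changed: Instead of re-joining and re-testing a growing prefix of the token list on every iteration (quadratic in the matched length), B walks the name once with a running position, matching each lowered token (plus its separating space) incrementally.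
import Mathlib
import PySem

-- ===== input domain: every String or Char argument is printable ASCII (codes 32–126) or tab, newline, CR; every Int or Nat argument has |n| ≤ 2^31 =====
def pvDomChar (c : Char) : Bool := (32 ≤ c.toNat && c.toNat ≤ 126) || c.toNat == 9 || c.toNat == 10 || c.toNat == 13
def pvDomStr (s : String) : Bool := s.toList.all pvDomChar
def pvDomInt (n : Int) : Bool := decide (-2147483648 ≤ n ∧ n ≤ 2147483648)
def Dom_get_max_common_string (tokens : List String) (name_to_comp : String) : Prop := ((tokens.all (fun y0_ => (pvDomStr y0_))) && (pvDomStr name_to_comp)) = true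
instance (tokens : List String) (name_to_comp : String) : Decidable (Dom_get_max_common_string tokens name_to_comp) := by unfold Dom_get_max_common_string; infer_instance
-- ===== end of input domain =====

-- B replaces A's loop that re-joins and re-tests a growing token prefix by a single
-- incremental scan with a running position; equivalence of the RETURN values is proved.

-- ===== PORT A =====
-- for i in range(1, len(tokens)+1): test_token = " ".join(lower_tokens[0:i]); startswith → keep going, else break
-- (lower_tokens[0:i] with the loop counter i : Nat, i ≥ 0, is exactly List.take i)
def pvALoop (lower_tokens : List String) (lower_name : String) (stop : Nat) (i : Nat)
    (working_token : List String) : List String :=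
  if i < stop then
    let test_token := PySem.Str.join " " (lower_tokens.take i)
    if PySem.Str.startswith lower_name test_token then
      pvALoop lower_tokens lower_name stop (i + 1) (lower_tokens.take i)
    else working_token
  else working_token
termination_by stop - i

def get_max_common_string (tokens : List String) (name_to_comp : String) : String :=
  -- tokens[0] raises IndexError on an empty list; Pre_ excludes that input, so the .getD default is never read
  let base_token := (PySem.List.pyGet? tokens 0).getD ""
  let lower_tokens := tokens.map PySem.Str.lower
  let lower_name := PySem.Str.lower name_to_comp
  let working_token := pvALoop lower_tokens lower_name (tokens.length + 1) 1 [base_token]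
  PySem.Str.join " " (PySem.List.slice tokens none (some (working_token.length : Int)))

-- ===== PORT B =====
-- one pass: piece = tok.lower() (with a leading " " after the first token); Python's
-- lower_name.startswith(piece, pos) with 0 ≤ pos ≤ len is exactly 'piece is a prefix of lower_name.drop pos'
def pvBLoop (lower_name : List Char) : List String → Nat → Nat → Nat → Nat
  | [], _, _, k => k
  | tok :: rest, i, pos, k =>
    let piece : List Char :=
      if i == 0 then (PySem.Str.lower tok).toList else ' ' :: (PySem.Str.lower tok).toList
    if piece.isPrefixOf (lower_name.drop pos) then
      pvBLoop lower_name rest (i + 1) (pos + piece.length) (k + 1)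
    else k

def get_max_common_string_alt (tokens : List String) (name_to_comp : String) : String :=
  let lower_name := (PySem.Str.lower name_to_comp).toList
  let k := pvBLoop lower_name tokens 0 0 0
  PySem.Str.join " " (tokens.take (max k 1))

-- ===== PRECONDITION & SPEC =====
-- Pre_ excludes only the empty token list, on which A raises IndexError at tokens[0].
def Pre_get_max_common_string (tokens : List String) (name_to_comp : String) : Prop := tokens ≠ []
instance (tokens : List String) (name_to_comp : String) : Decidable (Pre_get_max_common_string tokens name_to_comp) := by unfold Pre_get_max_common_string; infer_instance

def pvWitness_get_max_common_string : List String × String := (["Foo", "Bar"], "foo bar baz")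

def Spec_get_max_common_string (tokens : List String) (name_to_comp : String) (out : String) : Prop := out = get_max_common_string_alt tokens name_to_comp
instance (tokens : List String) (name_to_comp : String) (out : String) : Decidable (Spec_get_max_common_string tokens name_to_comp out) := by unfold Spec_get_max_common_string; infer_instance

-- ===== CLAIM (what is proved, stated in full; the proofs are below) =====
def Claim_equal_get_max_common_string : Prop := ∀ (tokens : List String) (name_to_comp : String), Dom_get_max_common_string tokens name_to_comp → Pre_get_max_common_string tokens name_to_comp → Spec_get_max_common_string tokens name_to_comp (get_max_common_string tokens name_to_comp)

-- ===== LEMMAS AND PROOFS =====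

-- " ".join(xs ++ [y]) appends y with a separating space unless xs is empty
lemma pv_join_append_single (s y : List Char) (xs : List (List Char)) :
    PySem.Chars.join s (xs ++ [y]) =
      if xs = [] then y else PySem.Chars.join s xs ++ s ++ y := by
  induction xs with
  | nil => simp [PySem.Chars.join_singleton]
  | cons a t ih =>
    cases t with
    | nil => simp [PySem.Chars.join_cons_cons, PySem.Chars.join_singleton]
    | cons b u =>
      have h1 : ((a :: b :: u) ++ [y]) = a :: ((b :: u) ++ [y]) := rfl
      have h2 : ((b :: u) ++ [y]) = b :: (u ++ [y]) := rfl
      rw [h1, h2, PySem.Chars.join_cons_cons, ← h2, ih]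
      simp [PySem.Chars.join_cons_cons, List.append_assoc]

-- prefix test of a concatenation splits into two prefix tests
lemma pv_prefix_append_iff {α : Type} (a b l : List α) :
    (a ++ b) <+: l ↔ a <+: l ∧ b <+: l.drop a.length := by
  constructor
  · rintro ⟨t, rfl⟩
    refine ⟨⟨b ++ t, by simp⟩, ?_⟩
    rw [List.append_assoc, List.drop_left]
    exact ⟨t, rfl⟩
  · rintro ⟨⟨u, rfl⟩, hb⟩
    rw [List.drop_left] at hb
    obtain ⟨v, rfl⟩ := hb
    exact ⟨v, by simp⟩

lemma pv_bLoop_le (ln : List Char) (l : List String) (i pos k : Nat) :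
    pvBLoop ln l i pos k ≤ k + l.length := by
  induction l generalizing i pos k with
  | nil => simp [pvBLoop]
  | cons tok rest ih =>
    rw [pvBLoop]
    split <;> split
    · exact le_trans (ih _ _ _) (by simp; omega)
    · exact Nat.le_add_right _ _
    · exact le_trans (ih _ _ _) (by simp; omega)
    · exact Nat.le_add_right _ _

lemma pv_bLoop_ge (ln : List Char) (l : List String) (i pos k : Nat) :
    k ≤ pvBLoop ln l i pos k := by
  induction l generalizing i pos k with
  | nil => simp [pvBLoop]
  | cons tok rest ih =>
    rw [pvBLoop]
    split <;> split
    · exact le_trans (by omega) (ih _ _ _)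
    · exact le_refl _
    · exact le_trans (by omega) (ih _ _ _)
    · exact le_refl _

-- the joined lowered prefix of the first k tokens (A's test_token at counter k)
def pvJ (tokens : List String) (k : Nat) : List Char :=
  PySem.Chars.join [' '] (((tokens.map PySem.Str.lower).map String.toList).take k)

-- loop correspondence: from a matched prefix of k tokens, A's greedy loop returns
-- the first r (= B's final count) lowered tokens (or its incoming accumulator if no further token matches)
lemma pv_loop_corr (tokens : List String) (lnS : String) :
    ∀ (d k : Nat) (w : List String), tokens.length = k + d →
    pvJ tokens k <+: lnS.toList →
    pvALoop (tokens.map PySem.Str.lower) lnS (tokens.length + 1) (k + 1) w =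
      (if pvBLoop lnS.toList (tokens.drop k) k (pvJ tokens k).length k = k then w
       else (tokens.map PySem.Str.lower).take
         (pvBLoop lnS.toList (tokens.drop k) k (pvJ tokens k).length k)) := by
  intro d
  induction d with
  | zero =>
    intro k w hlen hP
    have hdrop : tokens.drop k = [] := List.drop_eq_nil_of_le (by omega)
    rw [hdrop, pvALoop]
    have hstop : ¬ (k + 1 < tokens.length + 1) := by omega
    simp [hstop, pvBLoop]
  | succ d ih =>
    intro k w hlen hP
    have hklt : k < tokens.length := by omega
    have hklt' : k < ((tokens.map PySem.Str.lower).map String.toList).length := by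
      rw [List.length_map, List.length_map]; exact hklt
    have hdrop : tokens.drop k = tokens[k] :: tokens.drop (k + 1) :=
      List.drop_eq_getElem_cons hklt
    set pieceK : List Char :=
      (if (k == 0) = true then (PySem.Str.lower tokens[k]).toList
       else ' ' :: (PySem.Str.lower tokens[k]).toList) with hpiece
    have htake : ((tokens.map PySem.Str.lower).map String.toList).take (k + 1)
        = ((tokens.map PySem.Str.lower).map String.toList).take k
          ++ [(PySem.Str.lower tokens[k]).toList] := by
      rw [List.take_add_one, List.getElem?_eq_getElem hklt']
      simp
    have hJsucc : pvJ tokens (k + 1) = pvJ tokens k ++ pieceK := by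
      rcases Nat.eq_zero_or_pos k with hk0 | hkpos
      · subst hk0
        rw [hpiece]
        simp only [pvJ, htake, List.take_zero, List.nil_append,
          PySem.Chars.join_nil, PySem.Chars.join_singleton]
        simp
      · have hne : ((tokens.map PySem.Str.lower).map String.toList).take k ≠ [] := by
          intro h
          have hl := congrArg List.length h
          rw [List.length_take] at hl
          simp only [List.length_map, List.length_nil] at hl
          omega
        rw [hpiece]
        simp only [pvJ, htake, pv_join_append_single, if_neg hne]
        have hk0 : (k == 0) = false := by simp; omega
        rw [hk0]
        simp [List.append_assoc]
    have hcondiff :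
        PySem.Str.startswith lnS (PySem.Str.join " " ((tokens.map PySem.Str.lower).take (k + 1))) = true
        ↔ pieceK.isPrefixOf (List.drop (pvJ tokens k).length lnS.toList) = true := by
      rw [PySem.Str.startswith_eq, PySem.Chars.startswith_iff, List.isPrefixOf_iff_prefix]
      have hjoin : (PySem.Str.join " " ((tokens.map PySem.Str.lower).take (k + 1))).toList
          = pvJ tokens (k + 1) := by
        rw [PySem.Str.toList_join, List.map_take]
        rfl
      rw [hjoin, hJsucc, pv_prefix_append_iff]
      exact ⟨fun h => h.2, fun h => ⟨hP, h⟩⟩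
    rw [pvALoop, if_pos (show k + 1 < tokens.length + 1 by omega), hdrop, pvBLoop]
    by_cases hcond : pieceK.isPrefixOf (List.drop (pvJ tokens k).length lnS.toList) = true
    · -- both loops advance
      have hA := hcondiff.mpr hcond
      simp only [hA, if_true, ← hpiece, hcond]
      have hPsucc : pvJ tokens (k + 1) <+: lnS.toList := by
        rw [hJsucc, pv_prefix_append_iff]
        exact ⟨hP, List.isPrefixOf_iff_prefix.mp hcond⟩
      rw [ih (k + 1) ((tokens.map PySem.Str.lower).take (k + 1)) (by omega) hPsucc]
      have hposeq : (pvJ tokens k).length + pieceK.length = (pvJ tokens (k + 1)).length := by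
        rw [hJsucc, List.length_append]
      rw [hposeq]
      have hge : k + 1 ≤ pvBLoop lnS.toList (tokens.drop (k + 1)) (k + 1)
          ((pvJ tokens (k + 1)).length) (k + 1) := pv_bLoop_ge _ _ _ _ _
      generalize hgen : pvBLoop lnS.toList (tokens.drop (k + 1)) (k + 1)
          ((pvJ tokens (k + 1)).length) (k + 1) = r at hge ⊢
      have hne : ¬ (r = k) := by omega
      rw [if_neg hne]
      by_cases h1 : r = k + 1
      · rw [if_pos h1, h1]
      · rw [if_neg h1]
    · -- both loops stop
      have hnA : ¬ (PySem.Str.startswith lnS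
          (PySem.Str.join " " ((tokens.map PySem.Str.lower).take (k + 1))) = true) :=
        fun h => hcond (hcondiff.mp h)
      rw [if_neg hnA]
      have hcf : pieceK.isPrefixOf (List.drop (pvJ tokens k).length lnS.toList) = false := by
        cases hx : pieceK.isPrefixOf (List.drop (pvJ tokens k).length lnS.toList)
        · rfl
        · exact absurd hx hcond
      simp only [← hpiece, hcf, Bool.false_eq_true, if_false]
      simp

-- ===== VERDICT (by name: the statement is the Claim_ definition above) =====
theorem get_max_common_string_spec : Claim_equal_get_max_common_string := by
  intro tokens name_to_comp hDom hPre
  unfold Spec_get_max_common_string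
  simp only [get_max_common_string, get_max_common_string_alt]
  have hP0 : pvJ tokens 0 <+: (PySem.Str.lower name_to_comp).toList := by
    simp [pvJ, PySem.Chars.join_nil]
  have hmain := pv_loop_corr tokens (PySem.Str.lower name_to_comp) tokens.length 0
      [(PySem.List.pyGet? tokens 0).getD ""] (by omega) hP0
  have hJ0 : pvJ tokens 0 = [] := by simp [pvJ, PySem.Chars.join_nil]
  rw [hJ0] at hmain
  simp only [Nat.zero_add, List.drop_zero, List.length_nil] at hmain
  rw [hmain]
  have hle : pvBLoop (PySem.Str.lower name_to_comp).toList tokens 0 0 0 ≤ tokens.length := by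
    have := pv_bLoop_le (PySem.Str.lower name_to_comp).toList tokens 0 0 0
    omega
  by_cases h0 : pvBLoop (PySem.Str.lower name_to_comp).toList tokens 0 0 0 = 0
  · rw [if_pos h0, h0]
    have h1 : ([(PySem.List.pyGet? tokens 0).getD ""].length) = 1 := rfl
    rw [h1, PySem.List.slice_to tokens (by norm_num : (0:Int) ≤ ((1:Nat) : Int))]
    simp
  · rw [if_neg h0]
    have hlen2 : (((tokens.map PySem.Str.lower)).take
        (pvBLoop (PySem.Str.lower name_to_comp).toList tokens 0 0 0)).length
        = pvBLoop (PySem.Str.lower name_to_comp).toList tokens 0 0 0 := by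
      rw [List.length_take, List.length_map]
      omega
    rw [hlen2]
    rw [PySem.List.slice_to tokens (by positivity)]
    have hmax : max (pvBLoop (PySem.Str.lower name_to_comp).toList tokens 0 0 0) 1
        = pvBLoop (PySem.Str.lower name_to_comp).toList tokens 0 0 0 := by omega
    rw [hmax]
    simp
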